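-- pv_equiv track=rewrite | github.com/minzhangcheng/MPL | MPL/Misc/String.py | stringValidate
-- ===== SOURCE A (Python) =====
-- def stringValidate(string, invalidChar='"\\\'', transChar='\\'):
--
--     """
--     This function intend to check a string to see whether is has invalid
--     characters, usually including ", \, and '. If yes, trans-meaning character,
--     generally a back splash '\' would be insert before these characters.
--
--     stringValid(string,                   string to be checked
--                 invalidChar = '"\\\'',    invalid characters
--                 transChar = '\\')         trans-meaning character
--     """
--
--     check = False
--     for c in string:
--         if c in invalidChar:
--             check = True
--             break
--     if check:
--         chList = list(string)
--         i = 0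
--         while i < len(chList):
--             if chList[i] in invalidChar:
--                 chList.insert(i, transChar)
--                 i += 2
--             else:
--                 i += 1
--         return ''.join(chList)
--     else:
--         return string
-- ===== SOURCE B (Python) =====
-- def stringValidate(string, invalidChar='"\\\'', transChar='\\'):
--     return string.translate({ord(c): transChar + c for c in invalidChar})
-- ===== Notes on version B (the rewrite author's own statement) =====
-- stated objective: idiomatic
-- what changed: Replaced A's detection loop plus index-juggling list-insert while-loop with a single str.translate over a dict-comprehension table mapping each invalid character's code point to transChar + char.
import Mathlib
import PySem

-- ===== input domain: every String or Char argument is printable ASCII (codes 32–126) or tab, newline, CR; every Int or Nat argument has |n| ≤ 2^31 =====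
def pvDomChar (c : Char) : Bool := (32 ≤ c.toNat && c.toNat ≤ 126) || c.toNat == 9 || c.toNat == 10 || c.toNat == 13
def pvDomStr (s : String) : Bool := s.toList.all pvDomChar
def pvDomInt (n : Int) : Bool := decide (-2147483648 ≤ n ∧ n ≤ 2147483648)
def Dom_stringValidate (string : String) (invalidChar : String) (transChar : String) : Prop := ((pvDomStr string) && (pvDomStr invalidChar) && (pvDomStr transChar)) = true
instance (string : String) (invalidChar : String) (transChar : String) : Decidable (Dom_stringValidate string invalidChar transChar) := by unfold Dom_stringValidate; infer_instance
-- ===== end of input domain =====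

-- B replaces A's detect-then-insert loops by a single translation-table pass (str.translate); objective: idiomatic.

-- ===== PORT A =====
-- A's while loop: chList is the Python list of strings (each modelled as List Char);
-- `chList[i] in invalidChar` is Python substring membership (Chars.isIn);
-- `chList.insert(i, transChar)` is PySem.List.insert.
def pvALoop (inv t : List Char) (chList : List (List Char)) (i : Nat) : List (List Char) :=
  if h : i < chList.length then
    if PySem.Chars.isIn chList[i] inv then
      pvALoop inv t (PySem.List.insert chList (i : Int) t) (i + 2)
    else
      pvALoop inv t chList (i + 1)
  else chList
termination_by chList.length - i
decreasing_by
  · rw [PySem.List.length_insert]; omega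
  · omega

def stringValidate (string : String) (invalidChar : String) (transChar : String) : String :=
  -- the for/break detection loop: scan until the first invalid character
  let check := string.toList.any (fun c => PySem.Chars.isIn [c] invalidChar.toList)
  if check then
    String.ofList (PySem.Chars.join []
      (pvALoop invalidChar.toList transChar.toList (string.toList.map (fun c => [c])) 0))
  else string

-- ===== PORT B =====
-- Source B: table = {ord(c): transChar + c for c in invalidChar}; return string.translate(table)
def stringValidate_alt (string : String) (invalidChar : String) (transChar : String) : String :=
  let table : PySem.Dict Int (List Char) :=
    invalidChar.toList.foldl
      (fun d c => d.insert ((c.toNat : Int)) (transChar.toList ++ [c])) (PySem.Dict.mk [])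
  -- str.translate: each character is looked up by its code point; absent keys keep the character
  String.ofList ((string.toList.map (fun c => table.getD ((c.toNat : Int)) [c])).flatten)

-- ===== PRECONDITION & SPEC =====
def Spec_stringValidate (string : String) (invalidChar : String) (transChar : String) (out : String) : Prop := out = stringValidate_alt string invalidChar transChar
instance (string : String) (invalidChar : String) (transChar : String) (out : String) : Decidable (Spec_stringValidate string invalidChar transChar out) := by unfold Spec_stringValidate; infer_instance

-- ===== CLAIM =====
def Claim_equal_stringValidate : Prop := ∀ (string : String) (invalidChar : String) (transChar : String), Dom_stringValidate string invalidChar transChar → Spec_stringValidate string invalidChar transChar (stringValidate string invalidChar transChar)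

-- ===== LEMMAS AND PROOFS =====

-- single-character substring membership is list membership
theorem isIn_singleton (c : Char) (l : List Char) :
    PySem.Chars.isIn [c] l = true ↔ c ∈ l := by
  rw [PySem.Chars.isIn_iff_infix]
  constructor
  · rintro ⟨s, t, h⟩
    subst h; simp
  · intro h
    obtain ⟨s, t, h⟩ := List.append_of_mem h
    exact ⟨s, t, by simp [h]⟩

-- join with empty separator is flatten
theorem join_nil_eq_flatten (l : List (List Char)) :
    PySem.Chars.join [] l = l.flatten := by
  induction l with
  | nil => simp [PySem.Chars.join_nil]
  | cons x r ih =>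
    cases r with
    | nil => simp [PySem.Chars.join_singleton]
    | cons y s => rw [PySem.Chars.join_cons_cons]; simp_all

-- the table of B answers: escaped form for invalid chars, default otherwise
theorem table_getD (inv t : List Char) (d : PySem.Dict Int (List Char)) (c : Char) (d0 : List Char) :
    (inv.foldl (fun d c' => d.insert ((c'.toNat : Int)) (t ++ [c'])) d).getD ((c.toNat : Int)) d0
      = if c ∈ inv then t ++ [c] else d.getD ((c.toNat : Int)) d0 := by
  induction inv generalizing d with
  | nil => simp
  | cons a r ih =>
    simp only [List.foldl_cons, ih]
    by_cases hr : c ∈ r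
    · simp [hr]
    · rw [PySem.Dict.getD_insert]
      by_cases hca : c = a
      · subst hca; simp
      · have : ¬ ((c.toNat : Int) = (a.toNat : Int)) := by
          intro h
          exact hca (Char.ext (UInt32.toNat_inj.mp (by exact_mod_cast h)))
        simp [hr, hca, this]

-- functional description of A's while loop
def pvEsc (inv t : List Char) : List (List Char) → List (List Char)
  | [] => []
  | x :: r => if PySem.Chars.isIn x inv then t :: x :: pvEsc inv t r else x :: pvEsc inv t r

theorem pvALoop_eq (inv t : List Char) :
    ∀ (n : Nat) (chList : List (List Char)) (i : Nat), chList.length - i ≤ n →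
      pvALoop inv t chList i = chList.take i ++ pvEsc inv t (chList.drop i) := by
  intro n
  induction n with
  | zero =>
    intro chList i h
    have hle : chList.length ≤ i := by omega
    rw [pvALoop]
    simp [List.drop_eq_nil_of_le hle, List.take_of_length_le hle, pvEsc, Nat.not_lt.mpr hle]
  | succ n ih =>
    intro chList i h
    rw [pvALoop]
    by_cases hi : i < chList.length
    · simp only [hi, dif_pos]
      have hdrop : chList.drop i = chList[i] :: chList.drop (i + 1) :=
        List.drop_eq_getElem_cons hi
      have htklen : (chList.take i).length = i := List.length_take_of_le (le_of_lt hi)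
      by_cases hc : PySem.Chars.isIn chList[i] inv
      · simp only [hc, if_pos]
        have hlen : (PySem.List.insert chList (i : Int) t).length = chList.length + 1 :=
          PySem.List.length_insert chList (i : Int) t
        have hins : PySem.List.insert chList (i : Int) t
            = chList.take i ++ [t, chList[i]] ++ chList.drop (i + 1) := by
          rw [PySem.List.insert_natCast chList i t (le_of_lt hi), hdrop]; simp
        have hlen2 : (chList.take i ++ [t, chList[i]]).length = i + 2 := by
          simp [htklen]
        have htk : (chList.take i ++ [t, chList[i]] ++ chList.drop (i + 1)).take (i + 2)
            = chList.take i ++ [t, chList[i]] := by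
          rw [List.take_append, List.take_of_length_le (le_of_eq hlen2), hlen2]
          simp
        have hdr : (chList.take i ++ [t, chList[i]] ++ chList.drop (i + 1)).drop (i + 2)
            = chList.drop (i + 1) := by
          rw [List.drop_append, List.drop_eq_nil_of_le (le_of_eq hlen2), hlen2]
          simp
        rw [ih _ (i + 2) (by rw [hlen]; omega), hins, htk, hdr, hdrop]
        have hesc : pvEsc inv t (chList[i] :: chList.drop (i + 1))
            = t :: chList[i] :: pvEsc inv t (chList.drop (i + 1)) := by
          simp [pvEsc, hc]
        rw [hesc]
        simp only [List.append_assoc, List.cons_append, List.nil_append]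
      · simp only [hc, if_neg, Bool.not_eq_true]
        rw [ih _ (i + 1) (by omega)]
        have htk1 : chList.take (i + 1) = chList.take i ++ [chList[i]] :=
          List.take_succ_eq_append_getElem hi
        have hesc : pvEsc inv t (chList[i] :: chList.drop (i + 1))
            = chList[i] :: pvEsc inv t (chList.drop (i + 1)) := by
          simp [pvEsc, hc]
        rw [htk1, hdrop, hesc]
        simp only [List.append_assoc, List.singleton_append]
    · simp only [hi, dif_neg, not_false_iff]
      have hle : chList.length ≤ i := by omega
      simp [List.drop_eq_nil_of_le hle, List.take_of_length_le hle, pvEsc]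

-- flattening the escaped singleton list is B's per-character mapping
theorem esc_flatten (inv t : List Char) (cs : List Char) :
    (pvEsc inv t (cs.map (fun c => [c]))).flatten
      = (cs.map (fun c => if c ∈ inv then t ++ [c] else [c])).flatten := by
  induction cs with
  | nil => simp [pvEsc]
  | cons c r ih =>
    simp only [List.map_cons, pvEsc]
    by_cases hc : c ∈ inv
    · rw [if_pos ((isIn_singleton c inv).mpr hc)]
      simp [hc, ih]
    · rw [if_neg (by simp [isIn_singleton, hc])]
      simp [hc, ih]

theorem stringValidate_eq_alt (string invalidChar transChar : String) :
    stringValidate string invalidChar transChar = stringValidate_alt string invalidChar transChar := by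
  unfold stringValidate stringValidate_alt
  simp only []
  have hb : ∀ c : Char,
      ((invalidChar.toList.foldl
        (fun d c' => d.insert ((c'.toNat : Int)) (transChar.toList ++ [c'])) (PySem.Dict.mk [])).getD
          ((c.toNat : Int)) [c])
        = if c ∈ invalidChar.toList then transChar.toList ++ [c] else [c] := by
    intro c
    rw [table_getD]
    by_cases hc : c ∈ invalidChar.toList <;> simp [hc, PySem.Dict.getD, PySem.Dict.get?]
  by_cases hchk : string.toList.any (fun c => PySem.Chars.isIn [c] invalidChar.toList)
  · rw [if_pos hchk]
    rw [pvALoop_eq invalidChar.toList transChar.toList ((string.toList.map (fun c => [c])).length) _ 0 (by omega)]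
    simp only [List.take_zero, List.drop_zero, List.nil_append]
    rw [join_nil_eq_flatten, esc_flatten]
    have : (string.toList.map (fun c => if c ∈ invalidChar.toList then transChar.toList ++ [c] else [c]))
        = string.toList.map (fun c =>
            (invalidChar.toList.foldl
              (fun d c' => d.insert ((c'.toNat : Int)) (transChar.toList ++ [c'])) (PySem.Dict.mk [])).getD
                ((c.toNat : Int)) [c]) :=
      List.map_congr_left (fun c _ => (hb c).symm)
    rw [this]
  · rw [if_neg hchk]
    have hnone : ∀ c ∈ string.toList, c ∉ invalidChar.toList := by
      intro c hcmem hcin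
      exact hchk (List.any_eq_true.mpr ⟨c, hcmem, (isIn_singleton c invalidChar.toList).mpr hcin⟩)
    have : (string.toList.map (fun c =>
        (invalidChar.toList.foldl
          (fun d c' => d.insert ((c'.toNat : Int)) (transChar.toList ++ [c'])) (PySem.Dict.mk [])).getD
            ((c.toNat : Int)) [c])) = string.toList.map (fun c => [c]) := by
      apply List.map_congr_left
      intro c hc
      rw [hb c, if_neg (hnone c hc)]
    rw [this]
    have : ∀ l : List Char, (l.map (fun c => [c])).flatten = l := by
      intro l; induction l with
      | nil => simp
      | cons c r ih => simp [ih]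
    rw [this]
    simp

-- ===== VERDICT =====
theorem stringValidate_spec : Claim_equal_stringValidate := by
  intro string invalidChar transChar _
  unfold Spec_stringValidate
  exact stringValidate_eq_alt string invalidChar transChar
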